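-- pv_equiv track=rewrite | github.com/johngraff512/executive-panel-simulator | app.py | get_next_executive
-- ===== SOURCE A (Python) =====
-- def get_next_executive(selected_executives, conversation_history):
--     """Determine which executive should ask the next question"""
--
--     exec_question_count = {}
--     for exec_role in selected_executives:
--         exec_question_count[exec_role] = len([
--             msg for msg in conversation_history
--             if msg.get('type') == 'question' and msg.get('executive') == exec_role
--         ])
--
--     if not conversation_history:
--         return 'CEO' if 'CEO' in selected_executives else selected_executives[0]
--
--     min_questions = min(exec_question_count.values())
--     candidates = [exec for exec, count in exec_question_count.items() if count == min_questions]
--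
--     if len(candidates) > 1:
--         last_exec = None
--         for msg in reversed(conversation_history):
--             if msg.get('type') == 'question':
--                 last_exec = msg.get('executive')
--                 break
--
--         if last_exec in candidates:
--             try:
--                 current_index = candidates.index(last_exec)
--                 next_index = (current_index + 1) % len(candidates)
--                 return candidates[next_index]
--             except ValueError:
--                 pass
--
--     return candidates[0] if candidates else selected_executives[0]
-- ===== SOURCE B (Python) =====
-- def get_next_executive(selected_executives, conversation_history):
--     """Pick the next executive: least questions asked, round-robin tiebreak.
--     Instead of building a candidate list and rotating it, select in ONE min()
--     over the distinct executives, using a rotated-position key: positions are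
--     taken modulo-n relative to the last questioner, which makes the cyclically
--     next least-asked executive the unique minimum."""
--     counts = {}
--     last_exec = None
--     for msg in conversation_history:
--         if msg.get('type') == 'question':
--             e = msg.get('executive')
--             counts[e] = counts.get(e, 0) + 1
--             last_exec = e
--     if not conversation_history:
--         return 'CEO' if 'CEO' in selected_executives else selected_executives[0]
--     order = {}
--     for e in selected_executives:
--         if e not in order:
--             order[e] = len(order)
--     n = len(order)
--     min_q = min(counts.get(e, 0) for e in order)
--     if last_exec in order and counts.get(last_exec, 0) == min_q:
--         p = order[last_exec]
--         key = lambda e: (order[e] - p - 1) % n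
--     else:
--         key = lambda e: order[e]
--     return min((e for e in order if counts.get(e, 0) == min_q), key=key)
-- ===== Notes on version B (the rewrite author's own statement) =====
-- stated objective: faster
-- what changed: B makes one counting pass over the history (instead of one full scan per executive plus a reversed scan), and replaces A's candidate-list round-robin machinery (build candidates, .index() the last questioner, modular list indexing) with a single min() over the distinct executives using a rotated-position key ((rank - rank(last) - 1) % n), which makes the cyclically-next least-asked executive the unique minimum.
import Mathlib
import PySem

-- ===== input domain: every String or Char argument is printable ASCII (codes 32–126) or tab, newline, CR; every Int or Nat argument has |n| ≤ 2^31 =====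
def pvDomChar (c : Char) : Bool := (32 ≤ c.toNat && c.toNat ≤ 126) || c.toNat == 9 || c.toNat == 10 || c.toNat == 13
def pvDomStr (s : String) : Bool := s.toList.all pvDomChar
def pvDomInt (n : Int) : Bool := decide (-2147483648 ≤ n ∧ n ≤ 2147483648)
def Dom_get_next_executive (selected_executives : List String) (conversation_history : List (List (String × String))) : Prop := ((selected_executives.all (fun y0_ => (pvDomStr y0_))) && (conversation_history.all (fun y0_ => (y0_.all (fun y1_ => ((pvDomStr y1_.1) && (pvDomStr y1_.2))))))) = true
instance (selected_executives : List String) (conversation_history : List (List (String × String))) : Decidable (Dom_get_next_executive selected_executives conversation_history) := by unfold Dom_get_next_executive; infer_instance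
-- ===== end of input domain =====

-- B replaces A's candidate-list round-robin (build candidates, .index the last questioner,
-- modular list indexing) by one min() over the distinct executives with a rotated-position
-- key, after a single counting pass over the history; alternative algorithm, measured faster.

-- shared helpers: msg.get('type') == 'question'  /  msg.get('executive')
def pvIsQ (msg : List (String × String)) : Bool := (PySem.Dict.mk msg).get? "type" == some "question"
def pvExec (msg : List (String × String)) : Option String := (PySem.Dict.mk msg).get? "executive"

-- ===== PORT A =====
-- len([msg for msg in conversation_history if msg.get('type') == 'question' and msg.get('executive') == exec_role])
def pvCountA (conversation_history : List (List (String × String))) (role : String) : Int :=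
  ((conversation_history.filter (fun msg => pvIsQ msg && (pvExec msg == some role))).length : Int)

def get_next_executive (selected_executives : List String) (conversation_history : List (List (String × String))) : String :=
  let exec_question_count : PySem.Dict String Int :=
    selected_executives.foldl (fun d role => d.insert role (pvCountA conversation_history role)) PySem.Dict.empty
  if conversation_history.isEmpty then
    (if "CEO" ∈ selected_executives then "CEO" else selected_executives.headD "")
  else
    let min_questions : Int := (PySem.List.min? exec_question_count.values (fun v => v)).getD 0
    let candidates : List String :=
      (exec_question_count.items.filter (fun p => p.2 == min_questions)).map (fun p => p.1)
    if 1 < candidates.length then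
      let last_exec : Option String :=
        match conversation_history.reverse.find? (fun msg => pvIsQ msg) with
        | some msg => pvExec msg
        | none => none
      match last_exec with
      | some le =>
        if le ∈ candidates then
          -- try: candidates.index(le) — cannot fail since membership was checked; except falls through
          match PySem.List.index? candidates le with
          | some ci => PySem.List.pyGetD candidates (PySem.Int.mod ((ci : Int) + 1) (candidates.length : Int)) ""
          | none => candidates.headD (selected_executives.headD "")
        else candidates.headD (selected_executives.headD "")
      | none => candidates.headD (selected_executives.headD "")
    else candidates.headD (selected_executives.headD "")

-- ===== PORT B =====
def get_next_executive_alt (selected_executives : List String) (conversation_history : List (List (String × String))) : String :=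
  -- single pass: (counts keyed by msg.get('executive'), last questioner)
  let st :=
    conversation_history.foldl
      (fun (st : PySem.Dict (Option String) Int × Option String) msg =>
        if pvIsQ msg then
          (st.1.insert (pvExec msg) (st.1.getD (pvExec msg) 0 + 1), pvExec msg)
        else st)
      (PySem.Dict.empty, none)
  if conversation_history.isEmpty then
    (if "CEO" ∈ selected_executives then "CEO" else selected_executives.headD "")
  else
    -- order[e] = first-occurrence rank of e in selected_executives
    let order : PySem.Dict String Int :=
      selected_executives.foldl (fun d e => if d.contains e then d else d.insert e ((d.size : Nat) : Int)) PySem.Dict.empty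
    let n : Int := ((order.size : Nat) : Int)
    let min_q : Int := (PySem.List.min? (order.keys.map (fun e => st.1.getD (some e) 0)) (fun v => v)).getD 0
    -- rotated-position key when the last questioner is itself a least-asked executive
    let key : String → Int :=
      match st.2 with
      | some le =>
        if order.contains le && (st.1.getD (some le) 0 == min_q) then
          fun e => PySem.Int.mod (order.getD e 0 - order.getD le 0 - 1) n
        else fun e => order.getD e 0
      | none => fun e => order.getD e 0
    ((PySem.List.min? (order.keys.filter (fun e => st.1.getD (some e) 0 == min_q)) key).getD "")

-- ===== PRECONDITION & SPEC =====
-- A raises on an empty selected_executives list (IndexError on empty history, ValueError from min() otherwise).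
def Pre_get_next_executive (selected_executives : List String) (conversation_history : List (List (String × String))) : Prop :=
  selected_executives ≠ []
instance (selected_executives : List String) (conversation_history : List (List (String × String))) : Decidable (Pre_get_next_executive selected_executives conversation_history) := by unfold Pre_get_next_executive; infer_instance

def pvWitness_get_next_executive : List String × (List (List (String × String))) :=
  (["CEO", "CFO"], [[("type", "question"), ("executive", "CFO")]])

def Spec_get_next_executive (selected_executives : List String) (conversation_history : List (List (String × String))) (out : String) : Prop := out = get_next_executive_alt selected_executives conversation_history
instance (selected_executives : List String) (conversation_history : List (List (String × String))) (out : String) : Decidable (Spec_get_next_executive selected_executives conversation_history out) := by unfold Spec_get_next_executive; infer_instance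

-- ===== CLAIM (what is proved, stated in full; the proofs are below) =====
def Claim_equal_get_next_executive : Prop := ∀ (selected_executives : List String) (conversation_history : List (List (String × String))), Dom_get_next_executive selected_executives conversation_history → Pre_get_next_executive selected_executives conversation_history → Spec_get_next_executive selected_executives conversation_history (get_next_executive selected_executives conversation_history)

-- ===== LEMMAS AND PROOFS =====

-- B's single pass over the history, split into its two components
def pvBCounts (hist : List (List (String × String))) : PySem.Dict (Option String) Int :=
  hist.foldl (fun d msg => if pvIsQ msg then d.insert (pvExec msg) (d.getD (pvExec msg) 0 + 1) else d) PySem.Dict.empty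

def pvBLast (hist : List (List (String × String))) : Option String :=
  hist.foldl (fun l msg => if pvIsQ msg then pvExec msg else l) none

theorem pvBfold_gen (hist : List (List (String × String))) :
    ∀ (d : PySem.Dict (Option String) Int) (l : Option String),
    hist.foldl
      (fun (st : PySem.Dict (Option String) Int × Option String) msg =>
        if pvIsQ msg then
          (st.1.insert (pvExec msg) (st.1.getD (pvExec msg) 0 + 1), pvExec msg)
        else st)
      (d, l)
    = (hist.foldl (fun d msg => if pvIsQ msg then d.insert (pvExec msg) (d.getD (pvExec msg) 0 + 1) else d) d,
       hist.foldl (fun l msg => if pvIsQ msg then pvExec msg else l) l) := by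
  induction hist with
  | nil => intro d l; rfl
  | cons x t ih =>
    intro d l
    simp only [List.foldl_cons]
    by_cases h : pvIsQ x <;> simp [h, ih]

theorem pvBfold (hist : List (List (String × String))) :
    hist.foldl
      (fun (st : PySem.Dict (Option String) Int × Option String) msg =>
        if pvIsQ msg then
          (st.1.insert (pvExec msg) (st.1.getD (pvExec msg) 0 + 1), pvExec msg)
        else st)
      (PySem.Dict.empty, none)
    = (pvBCounts hist, pvBLast hist) := pvBfold_gen hist PySem.Dict.empty none

theorem pvBCounts_getD (hist : List (List (String × String))) (s : String) :
    (pvBCounts hist).getD (some s) 0 = pvCountA hist s := by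
  unfold pvBCounts pvCountA
  rw [PySem.List.foldl_if_eq_foldl_filter]
  rw [show (fun (d : PySem.Dict (Option String) Int) msg => d.insert (pvExec msg) (d.getD (pvExec msg) 0 + 1))
      = (fun d msg => (fun (d : PySem.Dict (Option String) Int) x => d.insert x (d.getD x 0 + 1)) d (pvExec msg)) from rfl,
    ← List.foldl_map (f := pvExec) (g := fun (d : PySem.Dict (Option String) Int) x => d.insert x (d.getD x 0 + 1))]
  rw [PySem.Dict.getD_foldl_insert_add_one]
  simp only [List.count_eq_length_filter, List.filter_map, List.filter_filter, List.length_map,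
    PySem.Dict.getD_empty, zero_add, Function.comp]
  congr 2
  apply List.filter_congr
  intro x _
  exact Bool.and_comm _ _

theorem pvBLast_gen (hist : List (List (String × String))) : ∀ (acc : Option String),
    hist.foldl (fun l msg => if pvIsQ msg then pvExec msg else l) acc
    = (match hist.reverse.find? (fun m => pvIsQ m) with
       | some m => pvExec m
       | none => acc) := by
  induction hist with
  | nil => intro acc; simp
  | cons x t ih =>
    intro acc
    simp only [List.foldl_cons, List.reverse_cons, List.find?_append]
    rw [ih]
    cases h : t.reverse.find? (fun m => pvIsQ m) with
    | some m => simp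
    | none => by_cases hq : pvIsQ x <;> simp [hq]

theorem pvBLast_eq2 (hist : List (List (String × String))) :
    pvBLast hist = (match hist.reverse.find? (fun m => pvIsQ m) with
       | some m => pvExec m
       | none => none) := pvBLast_gen hist none

-- A's count dict: getD over a value depending only on the key
theorem pvGetD_foldl_insert_const (f : String → Int) :
    ∀ (se : List String) (d : PySem.Dict String Int) (k : String),
    (se.foldl (fun d r => d.insert r (f r)) d).getD k 0
    = if k ∈ se then f k else d.getD k 0 := by
  intro se
  induction se with
  | nil => intro d k; simp
  | cons r t ih =>
    intro d k
    simp only [List.foldl_cons]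
    rw [ih]
    by_cases hkt : k ∈ t
    · simp [hkt]
    · by_cases hkr : k = r
      · subst hkr; simp [hkt, PySem.Dict.getD_insert_self]
      · simp only [hkt, hkr, List.mem_cons, or_self, if_false]
        exact PySem.Dict.getD_insert_of_ne d (f r) 0 hkr

-- B's order dict is the dedup list of selected_executives indexed 0,1,2,…
def pvIdxItems : List String → Nat → List (String × Int)
  | [], _ => []
  | x :: t, k => (x, (k : Int)) :: pvIdxItems t (k + 1)

theorem pvIdxItems_fst : ∀ (L : List String) (k : Nat), (pvIdxItems L k).map Prod.fst = L := by
  intro L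
  induction L with
  | nil => intro k; rfl
  | cons x t ih => intro k; simp [pvIdxItems, ih]

theorem pvIdxItems_length : ∀ (L : List String) (k : Nat), (pvIdxItems L k).length = L.length := by
  intro L
  induction L with
  | nil => intro k; rfl
  | cons x t ih => intro k; simp [pvIdxItems, ih]

theorem pvIdxItems_append : ∀ (L : List String) (x : String) (k : Nat),
    pvIdxItems (L ++ [x]) k = pvIdxItems L k ++ [(x, ((k + L.length : Nat) : Int))] := by
  intro L
  induction L with
  | nil => intro x k; simp [pvIdxItems]
  | cons y t ih =>
    intro x k
    simp only [List.cons_append, pvIdxItems, ih, List.length_cons]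
    have h : k + 1 + t.length = k + (t.length + 1) := by omega
    rw [h]

theorem pvIdxItems_mem : ∀ (L : List String) (k j : Nat) (h : j < L.length),
    (L[j], ((k + j : Nat) : Int)) ∈ pvIdxItems L k := by
  intro L
  induction L with
  | nil => intro k j h; simp at h
  | cons x t ih =>
    intro k j h
    cases j with
    | zero => simp [pvIdxItems]
    | succ j' =>
      have := ih (k + 1) j' (by simpa using h)
      simp only [pvIdxItems, List.getElem_cons_succ, List.mem_cons]
      right
      have heq : k + 1 + j' = k + (j' + 1) := by omega
      rw [← heq]
      exact this

theorem pvIdxItems_any (x : String) : ∀ (L : List String) (k : Nat),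
    ((pvIdxItems L k).any (fun p => p.1 == x)) = L.contains x := by
  intro L
  induction L with
  | nil => intro k; rfl
  | cons y t ih =>
    intro k
    simp only [pvIdxItems, List.any_cons, ih, List.contains_cons]
    rw [BEq.comm]

theorem pvOrderFold (se : List String) : ∀ (L : List String),
    se.foldl (fun d e => if d.contains e then d else d.insert e ((d.size : Nat) : Int))
      (PySem.Dict.mk (pvIdxItems L 0))
    = PySem.Dict.mk (pvIdxItems (PySem.Set.update L se) 0) := by
  induction se with
  | nil => intro L; rfl
  | cons x t ih =>
    intro L
    simp only [List.foldl_cons]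
    have hcont : (PySem.Dict.mk (pvIdxItems L 0)).contains x = L.contains x := by
      rw [PySem.Dict.contains_mk, pvIdxItems_any]
    have hupd : PySem.Set.update L (x :: t) = PySem.Set.update (PySem.Set.add L x) t := rfl
    by_cases hx : L.contains x
    · have hx' : x ∈ L := by simpa using hx
      have hadd : PySem.Set.add L x = L := by simp [PySem.Set.add, PySem.Set.contains, hx']
      rw [hcont, hupd, hadd]
      simp only [hx, if_true]
      exact ih L
    · have hx' : x ∉ L := by simpa using hx
      have hadd : PySem.Set.add L x = L ++ [x] := by simp [PySem.Set.add, PySem.Set.contains, hx']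
      rw [hcont, hupd, hadd]
      simp only [hx, Bool.false_eq_true, if_false]
      have hins : (PySem.Dict.mk (pvIdxItems L 0)).insert x (((PySem.Dict.mk (pvIdxItems L 0)).size : Nat) : Int)
          = PySem.Dict.mk (pvIdxItems (L ++ [x]) 0) := by
        apply PySem.Dict.ext
        rw [PySem.Dict.items_insert_of_not_contains _ _ (by rw [hcont]; exact Bool.of_not_eq_true hx)]
        rw [pvIdxItems_append]
        simp [PySem.Dict.size, pvIdxItems_length]
      rw [hins]
      exact ih (L ++ [x])

theorem pvPosGet (L : List String) (hnd : L.Nodup) (j : Nat) (h : j < L.length) :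
    (PySem.Dict.mk (pvIdxItems L 0)).getD L[j] 0 = (j : Int) := by
  have hmem : (L[j], ((0 + j : Nat) : Int)) ∈ pvIdxItems L 0 := pvIdxItems_mem L 0 j h
  have hkeys : (PySem.Dict.mk (pvIdxItems L 0)).keys = L := by
    rw [PySem.Dict.keys_mk]; exact pvIdxItems_fst L 0
  have := PySem.Dict.getD_of_mem_items (PySem.Dict.mk (pvIdxItems L 0)) hmem (by rw [hkeys]; exact hnd) 0
  simpa using this

-- min? with a key that is strictly smallest at x returns x
theorem pvMin?_eq_of_strict {α : Type} (xs : List α) (f : α → Int) (x : α) (hx : x ∈ xs)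
    (h : ∀ y ∈ xs, y ≠ x → f x < f y) : PySem.List.min? xs f = some x := by
  cases hmin : PySem.List.min? xs f with
  | none =>
    rw [PySem.List.min?_eq_none_iff] at hmin
    subst hmin; simp at hx
  | some m =>
    have hm := PySem.List.min?_mem hmin
    have hle := PySem.List.min?_isMin hmin x hx
    by_cases hmx : m = x
    · rw [hmx]
    · have := h m hm hmx
      omega

theorem pvModRange (v n : Int) (hn : 0 < n) (h1 : -n ≤ v) (h2 : v < n) :
    PySem.Int.mod v n = if 0 ≤ v then v else v + n := by
  rw [PySem.Int.mod_eq_emod_of_pos hn]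
  split_ifs with h
  · exact Int.emod_eq_of_lt h h2
  · have : v % n = (v + 1 * n) % n := (Int.add_mul_emod_self_right v 1 n).symm
    rw [this, one_mul]
    exact Int.emod_eq_of_lt (by omega) (by omega)


-- Python's list.index on L ++ x :: R with x not in L
theorem pvIdxOf?_split (x : String) : ∀ (L R : List String), x ∉ L →
    List.idxOf? x (L ++ x :: R) = some L.length := by
  intro L
  induction L with
  | nil => intro R _; simp [List.idxOf?_cons]
  | cons y t ih =>
    intro R h
    have hyx : (y == x) = false := by
      simp only [List.mem_cons, not_or] at h
      simp [Ne.symm h.1]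
    simp only [List.cons_append, List.idxOf?_cons, hyx, Bool.false_eq_true, if_false]
    rw [ih R (by simp only [List.mem_cons, not_or] at h; exact h.2)]
    rfl

theorem pvOrderFold0 (se : List String) :
    se.foldl (fun d e => if d.contains e then d else d.insert e ((d.size : Nat) : Int)) PySem.Dict.empty
    = PySem.Dict.mk (pvIdxItems (PySem.Set.ofList se) 0) := pvOrderFold se []

theorem main_eq (se : List String) (hist : List (List (String × String))) (hse : se ≠ []) :
    get_next_executive se hist = get_next_executive_alt se hist := by
  by_cases hh : hist = []
  · subst hh; rfl
  have hne : hist.isEmpty = false := by simpa [List.isEmpty_iff] using hh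
  simp only [get_next_executive, get_next_executive_alt, pvBfold, hne, Bool.false_eq_true,
    if_false, pvBCounts_getD]
  rw [pvOrderFold0 se]
  -- shared data
  have hKnd : (PySem.Set.ofList se).Nodup := PySem.Set.nodup_ofList se
  set K := PySem.Set.ofList se with hK
  have hKne : K ≠ [] := by
    cases se with
    | nil => exact absurd rfl hse
    | cons a t =>
      intro hnil
      have : a ∈ K := (PySem.Set.mem_ofList _ a).2 (List.mem_cons_self)
      rw [hnil] at this
      exact List.not_mem_nil this
  -- A's dict reduces to K with counts
  have hkeys : (se.foldl (fun d role => d.insert role (pvCountA hist role)) PySem.Dict.empty).keys = K := by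
    rw [PySem.Dict.keys_foldl_insert (f := fun _ role => pvCountA hist role)]
    simp [PySem.Dict.keys_empty, PySem.Set.update, PySem.Set.ofList, PySem.Set.empty, hK]
  have hnodup : (se.foldl (fun d role => d.insert role (pvCountA hist role)) PySem.Dict.empty).keys.Nodup := by
    rw [hkeys]; exact hKnd
  have hgetD : ∀ k ∈ K,
      (se.foldl (fun d role => d.insert role (pvCountA hist role)) PySem.Dict.empty).getD k 0
      = pvCountA hist k := by
    intro k hk
    rw [pvGetD_foldl_insert_const]
    simp [(PySem.Set.mem_ofList se k).1 hk]
  have hvalues : (se.foldl (fun d role => d.insert role (pvCountA hist role)) PySem.Dict.empty).values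
      = K.map (fun k => pvCountA hist k) := by
    rw [PySem.Dict.values_eq_map_keys _ hnodup 0, hkeys]
    exact List.map_congr_left (fun k hk => hgetD k hk)
  have hitems : (se.foldl (fun d role => d.insert role (pvCountA hist role)) PySem.Dict.empty).items
      = K.map (fun k => (k, pvCountA hist k)) := by
    rw [PySem.Dict.items_eq_map_keys _ hnodup 0, hkeys]
    exact List.map_congr_left (fun k hk => by rw [hgetD k hk])
  rw [hvalues, hitems]
  -- B's order dict
  have hOkeys : (PySem.Dict.mk (pvIdxItems K 0)).keys = K := by
    rw [PySem.Dict.keys_mk]; exact pvIdxItems_fst K 0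
  have hOsize : ((PySem.Dict.mk (pvIdxItems K 0)).size : Int) = (K.length : Int) := by
    simp [PySem.Dict.size, pvIdxItems_length]
  rw [hOkeys, hOsize]
  rw [← pvBLast_eq2]
  -- name the shared quantities
  set M : Int := (PySem.List.min? (K.map (fun k => pvCountA hist k)) (fun v => v)).getD 0 with hM
  -- A's candidate list is the filter of K
  have hcand : ((K.map (fun k => (k, pvCountA hist k))).filter (fun p => p.2 == M)).map (fun p => p.1)
      = K.filter (fun k => pvCountA hist k == M) := by
    rw [List.filter_map, List.map_map]
    simp [Function.comp_def]
  rw [hcand]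
  set cand := K.filter (fun k => pvCountA hist k == M) with hcandDef
  -- positions of the candidates in the dedup list
  set pos : String → Int := fun e => (PySem.Dict.mk (pvIdxItems K 0)).getD e 0 with hpos
  have hpairK : K.Pairwise (fun a b => pos a < pos b) := by
    rw [List.pairwise_iff_getElem]
    intro i j hi hj hij
    show (PySem.Dict.mk (pvIdxItems K 0)).getD K[i] 0 < (PySem.Dict.mk (pvIdxItems K 0)).getD K[j] 0
    rw [pvPosGet K hKnd i hi, pvPosGet K hKnd j hj]
    exact_mod_cast hij
  have hsub : cand.Sublist K := List.filter_sublist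
  have hpair : cand.Pairwise (fun a b => pos a < pos b) := hpairK.sublist hsub
  have hcndup : cand.Nodup := hKnd.sublist hsub
  have hbound : ∀ e ∈ K, 0 ≤ pos e ∧ pos e < (K.length : Int) := by
    intro e he
    obtain ⟨j, hj, rfl⟩ := List.mem_iff_getElem.1 he
    show 0 ≤ (PySem.Dict.mk (pvIdxItems K 0)).getD K[j] 0 ∧
      (PySem.Dict.mk (pvIdxItems K 0)).getD K[j] 0 < (K.length : Int)
    rw [pvPosGet K hKnd j hj]
    constructor
    · exact_mod_cast Nat.zero_le j
    · exact_mod_cast hj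
  have hcand_ne : cand ≠ [] := by
    have hmapne : K.map (fun k => pvCountA hist k) ≠ [] := by simpa [List.map_eq_nil_iff] using hKne
    cases hmin : PySem.List.min? (K.map (fun k => pvCountA hist k)) (fun v => v) with
    | none => exact absurd ((PySem.List.min?_eq_none_iff _ _).1 hmin) hmapne
    | some m =>
      have hmm := PySem.List.min?_mem hmin
      obtain ⟨e, he, hem⟩ := List.mem_map.1 hmm
      apply List.ne_nil_of_mem (a := e)
      rw [hcandDef]
      refine List.mem_filter.2 ⟨he, ?_⟩
      rw [hM, hmin]
      simp [hem]
  obtain ⟨c0, cs, hc0⟩ := List.exists_cons_of_ne_nil hcand_ne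
  -- min? with the plain position key picks the first candidate
  have hminpos : PySem.List.min? cand pos = some c0 := by
    apply pvMin?_eq_of_strict cand pos c0 (by rw [hc0]; exact List.mem_cons_self)
    intro y hy hync0
    rw [hc0] at hpair hy
    rcases List.mem_cons.1 hy with h | h
    · exact absurd h hync0
    · exact (List.pairwise_cons.1 hpair).1 y h
  have hheadD : ∀ d : String, cand.headD d = c0 := by
    intro d; rw [hc0]; rfl
  -- case split on the last questioner
  cases hlast : pvBLast hist with
  | none =>
    rw [hminpos]
    simp only [hheadD, Option.getD_some, ite_self]
  | some le =>
    by_cases hmem : le ∈ cand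
    · -- the last questioner is itself a least-asked candidate
      have hleK : le ∈ K := hsub.mem hmem
      have hcondB : ((PySem.Dict.mk (pvIdxItems K 0)).contains le && (pvCountA hist le == M)) = true := by
        have h2 := (List.mem_filter.1 (hcandDef ▸ hmem)).2
        rw [PySem.Dict.contains_eq_decide_mem_keys, hOkeys]
        simp [hleK, h2]
      simp only [hcondB, if_true]
      -- split cand at le
      obtain ⟨Lc, Rc, hsplit⟩ := List.append_of_mem hmem
      have hnd' := hcndup
      rw [hsplit] at hnd'
      have hleLc : le ∉ Lc := fun hin =>
        (List.nodup_cons.1 ((List.nodup_middle).1 hnd')).1 (List.mem_append.2 (Or.inl hin))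
      have hidx : PySem.List.index? cand le = some Lc.length := by
        rw [hsplit]
        exact pvIdxOf?_split le Lc Rc hleLc
      -- pairwise facts across the split
      have hpair' := hpair
      rw [hsplit] at hpair'
      rcases List.pairwise_append.1 hpair' with ⟨hpL, hpR, hcross⟩
      have hLlt : ∀ a ∈ Lc, pos a < pos le :=
        fun a ha => hcross a ha le List.mem_cons_self
      have hRgt : ∀ b ∈ Rc, pos le < pos b := (List.pairwise_cons.1 hpR).1
      -- numeric facts
      have hn : (0 : Int) < (K.length : Int) := by
        exact_mod_cast Nat.pos_of_ne_zero (fun h => hKne (List.eq_nil_of_length_eq_zero h))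
      have hple := hbound le hleK
      have hbc : ∀ e ∈ cand, 0 ≤ pos e ∧ pos e < (K.length : Int) :=
        fun e he => hbound e (hsub.mem he)
      have hrot : ∀ e ∈ cand,
          PySem.Int.mod (pos e - pos le - 1) (K.length : Int)
          = if pos le < pos e then pos e - pos le - 1 else pos e + (K.length : Int) - pos le - 1 := by
        intro e he
        have hbe := hbc e he
        rw [pvModRange _ _ hn (by omega) (by omega)]
        split_ifs <;> omega
      cases hRc : Rc with
      | nil =>
        cases hLc : Lc with
        | nil =>
          -- cand = [le]
          rw [hLc, hRc] at hsplit
          simp only [List.nil_append] at hsplit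
          have hlen : ¬ (1 < cand.length) := by rw [hsplit]; simp
          rw [if_neg hlen]
          have hminrot : PySem.List.min? cand
              (fun e => PySem.Int.mod ((PySem.Dict.mk (pvIdxItems K 0)).getD e 0 - (PySem.Dict.mk (pvIdxItems K 0)).getD le 0 - 1) (K.length : Int)) = some le := by
            apply pvMin?_eq_of_strict cand _ le (by rw [hsplit]; exact List.mem_cons_self)
            intro y hy hne'
            rw [hsplit] at hy
            rcases List.mem_cons.1 hy with h | h
            · exact absurd h hne'
            · exact absurd h List.not_mem_nil
          rw [hminrot, hsplit]
          rfl
        | cons l0 L' =>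
          rw [hLc] at hsplit hleLc hLlt hidx hpL
          rw [hRc] at hsplit hRgt
          have hlen : 1 < cand.length := by
            rw [hsplit]; simp only [List.length_append, List.length_cons]; omega
          rw [if_pos hlen, if_pos hmem]
          simp only [hidx]
          -- A: next index wraps to 0, the first candidate l0
          have hlenc : cand.length = L'.length + 2 := by
            rw [hsplit]; simp
          have hmodz : PySem.Int.mod (((l0 :: L').length : Nat) + 1 : Int) (cand.length : Int) = 0 := by
            have h1 : ((((l0 :: L').length : Nat) : Int) + 1) = ((((l0 :: L').length + 1 : Nat)) : Int) := by
              push_cast; ring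
            rw [h1, PySem.Int.mod_natCast]
            have h2 : ((l0 :: L').length + 1) % cand.length = 0 := by
              rw [hlenc]
              simp
            rw [h2]
            rfl
          rw [hmodz]
          have hA : PySem.List.pyGetD cand (0 : Int) "" = l0 := by
            rw [show (0 : Int) = ((0 : Nat) : Int) from rfl, PySem.List.pyGetD_natCast]
            rw [hsplit]
            rfl
          rw [hA]
          -- B: rotated min is l0
          have hl0 : l0 ∈ cand := by rw [hsplit]; exact List.mem_cons_self
          have hminrot : PySem.List.min? cand
              (fun e => PySem.Int.mod ((PySem.Dict.mk (pvIdxItems K 0)).getD e 0 - (PySem.Dict.mk (pvIdxItems K 0)).getD le 0 - 1) (K.length : Int)) = some l0 := by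
            apply pvMin?_eq_of_strict cand _ l0 hl0
            intro y hy hne'
            show PySem.Int.mod (pos l0 - pos le - 1) _ < PySem.Int.mod (pos y - pos le - 1) _
            rw [hrot l0 hl0, hrot y hy]
            have hbl0 := hbc l0 hl0
            have hby := hbc y hy
            have hl0lt : pos l0 < pos le := hLlt l0 List.mem_cons_self
            rw [hsplit] at hy
            rcases List.mem_append.1 hy with h | h
            · rcases List.mem_cons.1 h with h' | h'
              · exact absurd h' hne'
              · have hy1 : pos l0 < pos y := (List.pairwise_cons.1 hpL).1 y h'
                have hy2 : pos y < pos le := hLlt y h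
                split_ifs <;> omega
            · rcases List.mem_cons.1 h with h' | h'
              · subst h'
                split_ifs <;> omega
              · exact absurd h' List.not_mem_nil
          rw [hminrot]
          rfl
      | cons r R' =>
        rw [hRc] at hsplit hRgt hpR
        have hlen : 1 < cand.length := by
          rw [hsplit]; simp only [List.length_append, List.length_cons]; omega
        rw [if_pos hlen, if_pos hmem]
        simp only [hidx]
        have hlenc : cand.length = Lc.length + R'.length + 2 := by
          rw [hsplit]; simp
          omega
        have hmodv : PySem.Int.mod ((Lc.length : Nat) + 1 : Int) (cand.length : Int) = ((Lc.length + 1 : Nat) : Int) := by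
          have h1 : (((Lc.length : Nat) : Int) + 1) = (((Lc.length + 1 : Nat)) : Int) := by push_cast; ring
          rw [h1, PySem.Int.mod_natCast]
          have h2 : (Lc.length + 1) % cand.length = Lc.length + 1 := by
            apply Nat.mod_eq_of_lt
            omega
          rw [h2]
        rw [hmodv]
        have hA : PySem.List.pyGetD cand ((Lc.length + 1 : Nat) : Int) "" = r := by
          rw [PySem.List.pyGetD_natCast, hsplit]
          rw [List.getD_eq_getElem _ _ (by simp)]
          rw [List.getElem_append_right (by omega)]
          simp
        rw [hA]
        have hr : r ∈ cand := by
          rw [hsplit]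
          exact List.mem_append.2 (Or.inr (List.mem_cons.2 (Or.inr List.mem_cons_self)))
        have hminrot : PySem.List.min? cand
            (fun e => PySem.Int.mod ((PySem.Dict.mk (pvIdxItems K 0)).getD e 0 - (PySem.Dict.mk (pvIdxItems K 0)).getD le 0 - 1) (K.length : Int)) = some r := by
          apply pvMin?_eq_of_strict cand _ r hr
          intro y hy hne'
          show PySem.Int.mod (pos r - pos le - 1) _ < PySem.Int.mod (pos y - pos le - 1) _
          rw [hrot r hr, hrot y hy]
          have hbr := hbc r hr
          have hby := hbc y hy
          have hler : pos le < pos r := hRgt r List.mem_cons_self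
          rw [hsplit] at hy
          rcases List.mem_append.1 hy with h | h
          · have hy1 : pos y < pos le := hLlt y h
            split_ifs <;> omega
          · rcases List.mem_cons.1 h with h' | h'
            · subst h'
              split_ifs <;> omega
            · rcases List.mem_cons.1 h' with h'' | h''
              · exact absurd h'' hne'
              · have hpR2 := (List.pairwise_cons.1 hpR).2
                have hy1 : pos r < pos y := (List.pairwise_cons.1 hpR2).1 y h''
                split_ifs <;> omega
        rw [hminrot]
        rfl
    · -- last questioner not among the candidates: both take the first candidate
      have hcondB : ((PySem.Dict.mk (pvIdxItems K 0)).contains le && (pvCountA hist le == M)) = false := by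
        rw [PySem.Dict.contains_eq_decide_mem_keys, hOkeys]
        by_cases h1 : le ∈ K
        · have h2 : ¬ (pvCountA hist le == M) = true :=
            fun h => hmem (hcandDef ▸ List.mem_filter.2 ⟨h1, h⟩)
          simp [h1, Bool.eq_false_iff.2 h2]
        · simp [h1]
      simp only [hcondB, Bool.false_eq_true, if_false]
      rw [if_neg hmem] 
      rw [hminpos]
      simp only [hheadD, Option.getD_some, ite_self]

-- ===== VERDICT (by name: the statement is the Claim_ definition above) =====
theorem get_next_executive_spec : Claim_equal_get_next_executive := by
  intro se hist _ hse
  exact main_eq se hist hse
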